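-- pv_equiv track=rewrite | github.com/Riteshyadav025/Python-Lab- | 23-02-2026 To 01- 03 -2026/combinatorics(Counting)problem.py | count_unique_vowel_strings
-- ===== SOURCE A (Python) =====
-- from math import factorial
-- from collections import Counter
--
-- def count_unique_vowel_strings(s):
--     vowels = {'a', 'e', 'i', 'o', 'u'}
--
--     freq = Counter(s)
--
--     vowel_freq = {ch: freq[ch] for ch in vowels if ch in freq}
--
--     if not vowel_freq:
--         return 0
--
--     selection_ways = 1
--     for count in vowel_freq.values():
--         selection_ways *= count
--
--     k = len(vowel_freq)
--     permutation_ways = factorial(k)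
--
--     return selection_ways * permutation_ways
-- ===== SOURCE B (Python) =====
-- def count_unique_vowel_strings(s):
--     # Online single pass: maintain each vowel's count, the running product of
--     # positive counts, and the running factorial, updating all incrementally.
--     a = e = i = o = u = 0
--     product = 1
--     perm = 1
--     k = 0
--     for ch in s:
--         if ch == 'a':
--             c = a; a = c + 1
--         elif ch == 'e':
--             c = e; e = c + 1
--         elif ch == 'i':
--             c = i; i = c + 1
--         elif ch == 'o':
--             c = o; o = c + 1
--         elif ch == 'u':
--             c = u; u = c + 1
--         else:
--             continue
--         if c == 0:
--             k += 1
--             perm *= k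
--         else:
--             product //= c
--         product *= c + 1
--     return product * perm if k else 0
-- ===== Notes on version B (the rewrite author's own statement) =====
-- stated objective: alternative
-- what changed: Replaced A's batch strategy (build a Counter, filter the five vowels into a dict, then multiply its values and take factorial of its size) with an online single pass that maintains five explicit vowel counters and incrementally updates the running selection product (dividing out the old count) and the running factorial as each vowel arrives, so no frequency table or post-loop aggregation exists.
import Mathlib
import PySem

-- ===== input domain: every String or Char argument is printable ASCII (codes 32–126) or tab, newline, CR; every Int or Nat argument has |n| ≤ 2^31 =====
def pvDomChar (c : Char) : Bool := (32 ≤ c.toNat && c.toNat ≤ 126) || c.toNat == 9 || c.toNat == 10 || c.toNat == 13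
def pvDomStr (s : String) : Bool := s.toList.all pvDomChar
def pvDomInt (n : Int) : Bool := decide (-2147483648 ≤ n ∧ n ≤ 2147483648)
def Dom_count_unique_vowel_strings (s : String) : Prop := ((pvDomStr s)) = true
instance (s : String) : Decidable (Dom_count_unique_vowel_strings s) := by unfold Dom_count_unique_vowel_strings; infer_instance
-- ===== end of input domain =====

-- B replaces A's batch Counter-then-multiply with an online single pass that keeps five
-- vowel counters and incrementally maintains the selection product and factorial (alternative).

-- ===== PORT A =====
def count_unique_vowel_strings (s : String) : Int :=
  let vowels : List Char := ['a', 'e', 'i', 'o', 'u']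
  let freq : PySem.Dict Char Int := PySem.Dict.counter s.toList
  let vowel_freq : PySem.Dict Char Int :=
    vowels.foldl (fun d ch => if freq.contains ch then d.insert ch (freq.getD ch 0) else d)
      PySem.Dict.empty
  if vowel_freq.items.isEmpty then 0
  else
    let selection_ways := vowel_freq.values.foldl (fun acc c => acc * c) 1
    let k := vowel_freq.items.length
    selection_ways * (Nat.factorial k : Int)

-- ===== PORT B =====
-- state: (a, e, i, o, u, product, perm, k), exactly Source B's eight variables
structure BState where
  a : Int
  e : Int
  i : Int
  o : Int
  u : Int
  product : Int
  perm : Int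
  k : Int
deriving Repr, DecidableEq

-- the shared tail of Source B's loop body: given old count c, new (product, perm, k)
def bTail (product perm k c : Int) : Int × Int × Int :=
  if c = 0 then ((product) * (c + 1), perm * (k + 1), k + 1)
  else ((PySem.Int.floordiv product c) * (c + 1), perm, k)

def bStep (st : BState) (ch : Char) : BState :=
  if ch = 'a' then
    let c := st.a
    let t := bTail st.product st.perm st.k c
    { st with a := c + 1, product := t.1, perm := t.2.1, k := t.2.2 }
  else if ch = 'e' then
    let c := st.e
    let t := bTail st.product st.perm st.k c
    { st with e := c + 1, product := t.1, perm := t.2.1, k := t.2.2 }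
  else if ch = 'i' then
    let c := st.i
    let t := bTail st.product st.perm st.k c
    { st with i := c + 1, product := t.1, perm := t.2.1, k := t.2.2 }
  else if ch = 'o' then
    let c := st.o
    let t := bTail st.product st.perm st.k c
    { st with o := c + 1, product := t.1, perm := t.2.1, k := t.2.2 }
  else if ch = 'u' then
    let c := st.u
    let t := bTail st.product st.perm st.k c
    { st with u := c + 1, product := t.1, perm := t.2.1, k := t.2.2 }
  else st

def count_unique_vowel_strings_alt (s : String) : Int :=
  let st := s.toList.foldl bStep ⟨0, 0, 0, 0, 0, 1, 1, 0⟩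
  if st.k ≠ 0 then st.product * st.perm else 0

-- ===== PRECONDITION & SPEC =====
def Spec_count_unique_vowel_strings (s : String) (out : Int) : Prop := out = count_unique_vowel_strings_alt s
instance (s : String) (out : Int) : Decidable (Spec_count_unique_vowel_strings s out) := by unfold Spec_count_unique_vowel_strings; infer_instance

-- ===== CLAIM (what is proved, stated in full; the proofs are below) =====
def Claim_equal_count_unique_vowel_strings : Prop := ∀ (s : String), Dom_count_unique_vowel_strings s → Spec_count_unique_vowel_strings s (count_unique_vowel_strings s)

-- ===== LEMMAS AND PROOFS =====

-- positive-part product factor and 0/1 presence indicator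
def gpos (x : Int) : Int := if 0 < x then x else 1
def posc (x : Int) : Int := if 0 < x then 1 else 0

-- B's loop invariant
def BInv (st : BState) : Prop :=
  0 ≤ st.a ∧ 0 ≤ st.e ∧ 0 ≤ st.i ∧ 0 ≤ st.o ∧ 0 ≤ st.u ∧
  st.k = posc st.a + posc st.e + posc st.i + posc st.o + posc st.u ∧
  st.perm = (Nat.factorial st.k.toNat : Int) ∧
  st.product = gpos st.a * gpos st.e * gpos st.i * gpos st.o * gpos st.u

theorem bTail_pos (R perm k c : Int) (hc : 0 < c) :
    bTail (c * R) perm k c = (R * (c + 1), perm, k) := by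
  unfold bTail
  rw [if_neg (by omega)]
  have : PySem.Int.floordiv (c * R) c = R := by
    rw [PySem.Int.floordiv_eq_ediv_of_pos hc, Int.mul_ediv_cancel_left R (by omega)]
  rw [this]

-- effect of the shared loop tail on an invariant-shaped state
theorem bTail_gpos (a R perm k : Int) (ha : 0 ≤ a) (hk : 0 ≤ k)
    (hperm : perm = (Nat.factorial k.toNat : Int)) :
    bTail (gpos a * R) perm k a =
      (gpos (a + 1) * R,
       (Nat.factorial (k + (1 - posc a)).toNat : Int),
       k + (1 - posc a)) := by
  rcases eq_or_lt_of_le ha with h0 | h0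
  · -- a = 0
    subst hperm
    rw [← h0]
    unfold bTail gpos posc
    norm_num
    rw [show (k + 1).toNat = k.toNat + 1 by omega, Nat.factorial_succ]
    push_cast
    rw [show ((k.toNat : Int)) = k by omega]
    ring
  · -- 0 < a
    have hg : gpos a = a := by unfold gpos; rw [if_pos h0]
    have hp : posc a = 1 := by unfold posc; rw [if_pos h0]
    rw [hg, bTail_pos R perm k a h0, hp, hperm]
    have hg1 : gpos (a + 1) = a + 1 := by unfold gpos; rw [if_pos (by omega)]
    rw [hg1]
    norm_num
    ring

-- unfolding equations for bStep (definitional; the literal-char tests compute)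
theorem bStep_a (st : BState) : bStep st 'a' =
    { st with
      a := st.a + 1,
      product := (bTail st.product st.perm st.k st.a).1,
      perm := (bTail st.product st.perm st.k st.a).2.1,
      k := (bTail st.product st.perm st.k st.a).2.2 } := rfl
theorem bStep_e (st : BState) : bStep st 'e' =
    { st with
      e := st.e + 1,
      product := (bTail st.product st.perm st.k st.e).1,
      perm := (bTail st.product st.perm st.k st.e).2.1,
      k := (bTail st.product st.perm st.k st.e).2.2 } := rfl
theorem bStep_i (st : BState) : bStep st 'i' =
    { st with
      i := st.i + 1,
      product := (bTail st.product st.perm st.k st.i).1,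
      perm := (bTail st.product st.perm st.k st.i).2.1,
      k := (bTail st.product st.perm st.k st.i).2.2 } := rfl
theorem bStep_o (st : BState) : bStep st 'o' =
    { st with
      o := st.o + 1,
      product := (bTail st.product st.perm st.k st.o).1,
      perm := (bTail st.product st.perm st.k st.o).2.1,
      k := (bTail st.product st.perm st.k st.o).2.2 } := rfl
theorem bStep_u (st : BState) : bStep st 'u' =
    { st with
      u := st.u + 1,
      product := (bTail st.product st.perm st.k st.u).1,
      perm := (bTail st.product st.perm st.k st.u).2.1,
      k := (bTail st.product st.perm st.k st.u).2.2 } := rfl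
theorem bStep_other (st : BState) (ch : Char) (n1 : ch ≠ 'a') (n2 : ch ≠ 'e')
    (n3 : ch ≠ 'i') (n4 : ch ≠ 'o') (n5 : ch ≠ 'u') : bStep st ch = st := by
  unfold bStep
  rw [if_neg n1, if_neg n2, if_neg n3, if_neg n4, if_neg n5]

theorem bStep_inv (st : BState) (ch : Char) (h : BInv st) :
    BInv (bStep st ch) ∧
      (bStep st ch).a = st.a + (if ch = 'a' then 1 else 0) ∧
      (bStep st ch).e = st.e + (if ch = 'e' then 1 else 0) ∧
      (bStep st ch).i = st.i + (if ch = 'i' then 1 else 0) ∧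
      (bStep st ch).o = st.o + (if ch = 'o' then 1 else 0) ∧
      (bStep st ch).u = st.u + (if ch = 'u' then 1 else 0) := by
  obtain ⟨h1, h2, h3, h4, h5, hk, hperm, hprod⟩ := h
  have hk0 : 0 ≤ st.k := by
    rw [hk]; unfold posc; split_ifs <;> omega
  have hposc : ∀ x : Int, 0 ≤ x → posc (x + 1) = 1 := by
    intro x hx; unfold posc; rw [if_pos (by omega)]
  by_cases c1 : ch = 'a'
  · subst c1
    rw [bStep_a,
        show st.product = gpos st.a * (gpos st.e * gpos st.i * gpos st.o * gpos st.u) from by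
          rw [hprod]; ring,
        bTail_gpos st.a _ st.perm st.k h1 hk0 hperm]
    refine ⟨⟨by dsimp only; omega, h2, h3, h4, h5, ?_, rfl, by dsimp only; ring⟩, by simp⟩
    dsimp only
    rw [hposc st.a h1, hk]
    unfold posc; split_ifs <;> omega
  by_cases c2 : ch = 'e'
  · subst c2
    rw [bStep_e,
        show st.product = gpos st.e * (gpos st.a * gpos st.i * gpos st.o * gpos st.u) from by
          rw [hprod]; ring,
        bTail_gpos st.e _ st.perm st.k h2 hk0 hperm]
    refine ⟨⟨h1, by dsimp only; omega, h3, h4, h5, ?_, rfl, by dsimp only; ring⟩, by simp⟩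
    dsimp only
    rw [hposc st.e h2, hk]
    unfold posc; split_ifs <;> omega
  by_cases c3 : ch = 'i'
  · subst c3
    rw [bStep_i,
        show st.product = gpos st.i * (gpos st.a * gpos st.e * gpos st.o * gpos st.u) from by
          rw [hprod]; ring,
        bTail_gpos st.i _ st.perm st.k h3 hk0 hperm]
    refine ⟨⟨h1, h2, by dsimp only; omega, h4, h5, ?_, rfl, by dsimp only; ring⟩, by simp⟩
    dsimp only
    rw [hposc st.i h3, hk]
    unfold posc; split_ifs <;> omega
  by_cases c4 : ch = 'o'
  · subst c4
    rw [bStep_o,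
        show st.product = gpos st.o * (gpos st.a * gpos st.e * gpos st.i * gpos st.u) from by
          rw [hprod]; ring,
        bTail_gpos st.o _ st.perm st.k h4 hk0 hperm]
    refine ⟨⟨h1, h2, h3, by dsimp only; omega, h5, ?_, rfl, by dsimp only; ring⟩, by simp⟩
    dsimp only
    rw [hposc st.o h4, hk]
    unfold posc; split_ifs <;> omega
  by_cases c5 : ch = 'u'
  · subst c5
    rw [bStep_u,
        show st.product = gpos st.u * (gpos st.a * gpos st.e * gpos st.i * gpos st.o) from by
          rw [hprod]; ring,
        bTail_gpos st.u _ st.perm st.k h5 hk0 hperm]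
    refine ⟨⟨h1, h2, h3, h4, by dsimp only; omega, ?_, rfl, by dsimp only; ring⟩, by simp⟩
    dsimp only
    rw [hposc st.u h5, hk]
    unfold posc; split_ifs <;> omega
  · rw [bStep_other st ch c1 c2 c3 c4 c5]
    exact ⟨⟨h1, h2, h3, h4, h5, hk, hperm, hprod⟩, by simp [c1, c2, c3, c4, c5]⟩

theorem bFold_inv (l : List Char) (st : BState) (h : BInv st) :
    BInv (l.foldl bStep st) ∧
      (l.foldl bStep st).a = st.a + (l.count 'a' : Int) ∧
      (l.foldl bStep st).e = st.e + (l.count 'e' : Int) ∧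
      (l.foldl bStep st).i = st.i + (l.count 'i' : Int) ∧
      (l.foldl bStep st).o = st.o + (l.count 'o' : Int) ∧
      (l.foldl bStep st).u = st.u + (l.count 'u' : Int) := by
  induction l generalizing st with
  | nil => simpa using h
  | cons c t ih =>
    obtain ⟨h1, h2, h3, h4, h5, h6⟩ := bStep_inv st c h
    obtain ⟨g1, g2, g3, g4, g5, g6⟩ := ih (bStep st c) h1
    refine ⟨g1, ?_, ?_, ?_, ?_, ?_⟩ <;>
      simp only [List.foldl_cons, List.count_cons, g2, g3, g4, g5, g6, h2, h3, h4, h5, h6,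
        beq_iff_eq] <;>
      split_ifs <;> push_cast <;> omega

-- ===== VERDICT (by name: the statement is the Claim_ definition above) =====
theorem count_unique_vowel_strings_spec : Claim_equal_count_unique_vowel_strings := by
  intro s _
  unfold Spec_count_unique_vowel_strings count_unique_vowel_strings count_unique_vowel_strings_alt
  have h0 : BInv ⟨0, 0, 0, 0, 0, 1, 1, 0⟩ := by
    unfold BInv posc gpos; norm_num [Nat.factorial]
  obtain ⟨hinv, ha, he, hi, ho, hu⟩ := bFold_inv s.toList _ h0
  obtain ⟨-, -, -, -, -, hk, hperm, hprod⟩ := hinv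
  simp only [ha, he, hi, ho, hu, zero_add] at hk hperm hprod
  simp only [List.foldl, PySem.Dict.contains_counter, PySem.Dict.getD_counter, hk, hperm, hprod]
  clear ha he hi ho hu hk hperm hprod
  by_cases qa : 'a' ∈ s.toList <;> by_cases qe : 'e' ∈ s.toList <;>
    by_cases qi : 'i' ∈ s.toList <;> by_cases qo : 'o' ∈ s.toList <;>
    by_cases qu : 'u' ∈ s.toList <;>
  · simp [List.contains_eq_mem, qa, qe, qi, qo, qu, PySem.Dict.insert, PySem.Dict.empty,
      PySem.Dict.values, posc, gpos, Int.natCast_pos, List.count_pos_iff,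
      List.count_eq_zero_of_not_mem, Nat.factorial]
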